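-- pv_equiv track=rewrite | github.com/asya-seag/Course-homework | assessement_files/assessement2_1.py | consonant_count
-- ===== SOURCE A (Python) =====
-- def consonant_count(input):
--     #creating vowels dictionary to exclude them from search
--     vowels = {'a', 'e', 'o', 'u', 'i'}
--     #list of consonants but we will add only the ones with count 1
--     consonants = []
--     #keeping track of how many times consonants came up
--     count = {}
--
--     #using lower to make sure we avoid counting capital letters as different consonants in case input has them
--     for x in input.lower():
--         if x.isalpha() and x not in vowels:
--             if x in count:
--                 count[x] += 1
--             else:
--                 count[x] = 1
--     #adding to consonants list only the ones with count 1
--     for key, value in count.items():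
--         if value == 1:
--             consonants.append(key)
--
--     return len(consonants)
-- ===== SOURCE B (Python) =====
-- def consonant_count(input):
--     vowels = {'a', 'e', 'o', 'u', 'i'}
--     seen_once = set()
--     seen_more = set()
--     for x in input.lower():
--         if x.isalpha() and x not in vowels:
--             if x in seen_once:
--                 seen_once.discard(x)
--                 seen_more.add(x)
--             elif x not in seen_more:
--                 seen_once.add(x)
--     return len(seen_once)
-- ===== Notes on version B (the rewrite author's own statement) =====
-- stated objective: simpler
-- what changed: Replaced the count-dictionary plus a second pass over its items with a single pass maintaining two sets (seen exactly once / seen more than once), returning the size of the first.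
import Mathlib
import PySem

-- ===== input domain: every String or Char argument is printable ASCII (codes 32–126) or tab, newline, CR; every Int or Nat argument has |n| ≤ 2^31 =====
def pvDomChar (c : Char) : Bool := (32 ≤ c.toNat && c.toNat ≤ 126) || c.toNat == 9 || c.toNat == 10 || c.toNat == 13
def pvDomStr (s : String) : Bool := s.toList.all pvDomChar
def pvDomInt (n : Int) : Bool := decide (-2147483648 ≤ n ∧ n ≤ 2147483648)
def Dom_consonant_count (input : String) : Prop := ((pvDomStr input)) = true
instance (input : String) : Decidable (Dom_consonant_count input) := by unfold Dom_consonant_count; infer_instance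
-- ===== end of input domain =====

-- B replaces A's count-dictionary plus second pass over its items with a single pass
-- maintaining two sets (seen exactly once / seen more than once); objective: simpler.

-- ===== PORT A =====
def consonant_count (input : String) : Int :=
  let vowels : PySem.Set Char := PySem.Set.ofList ['a', 'e', 'o', 'u', 'i']
  let count : PySem.Dict Char Int :=
    (PySem.Str.lower input).toList.foldl
      (fun d x =>
        if PySem.Chars.isalpha x && !(PySem.Set.contains vowels x) then
          if d.contains x then d.modify x 0 (· + 1) else d.insert x 1
        else d)
      PySem.Dict.empty
  let consonants : List Char :=
    count.items.foldl (fun cs p => if p.2 == 1 then cs ++ [p.1] else cs) []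
  (consonants.length : Int)

-- ===== PORT B =====
def consonant_count_alt (input : String) : Int :=
  let vowels : PySem.Set Char := PySem.Set.ofList ['a', 'e', 'o', 'u', 'i']
  let st : PySem.Set Char × PySem.Set Char :=
    (PySem.Str.lower input).toList.foldl
      (fun s x =>
        if PySem.Chars.isalpha x && !(PySem.Set.contains vowels x) then
          if PySem.Set.contains s.1 x then (PySem.Set.discard s.1 x, PySem.Set.add s.2 x)
          else if PySem.Set.contains s.2 x then s
          else (PySem.Set.add s.1 x, s.2)
        else s)
      (PySem.Set.empty, PySem.Set.empty)
  PySem.Set.len st.1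

-- ===== PRECONDITION & SPEC =====
def Spec_consonant_count (input : String) (out : Int) : Prop := out = consonant_count_alt input
instance (input : String) (out : Int) : Decidable (Spec_consonant_count input out) := by unfold Spec_consonant_count; infer_instance

-- ===== CLAIM (what is proved, stated in full; the proofs are below) =====
def Claim_equal_consonant_count : Prop := ∀ (input : String), Dom_consonant_count input → Spec_consonant_count input (consonant_count input)

-- ===== LEMMAS AND PROOFS =====

-- the shared filter condition: lower-case consonant letter
def pvCond (x : Char) : Bool :=
  PySem.Chars.isalpha x && !(PySem.Set.contains (PySem.Set.ofList ['a', 'e', 'o', 'u', 'i']) x)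

-- A's dict-building step is exactly Counter's step
theorem pvA_step (d : PySem.Dict Char Int) (x : Char) :
    (if d.contains x then d.modify x 0 (· + 1) else d.insert x 1) = d.modify x 0 (· + 1) := by
  by_cases h : d.contains x = true
  · simp [h]
  · simp only [PySem.Dict.modify, Bool.not_eq_true] at *
    rw [PySem.Dict.getD_of_not_contains d 0 h]
    simp [h]

-- A computes the number of distinct chars of fl := filter pvCond (lower input) with count 1
theorem pvA_eq (fl : List Char) :
    ((fl.foldl (fun d x => d.modify x 0 (· + 1)) (PySem.Dict.empty : PySem.Dict Char Int)).items.foldl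
        (fun cs p => if p.2 == 1 then cs ++ [p.1] else cs) []).length
      = ((PySem.Set.ofList fl).filter (fun k => fl.count k == 1)).length := by
  rw [← PySem.Dict.counter_eq_foldl, PySem.List.foldl_append_if, PySem.Dict.items_counter]
  simp only [List.filter_map, Function.comp_def, List.nil_append, List.length_map]
  congr 1
  apply List.filter_congr
  intro k _
  simp [Nat.cast_eq_one]

-- B's invariant: after the fold over l, the first set holds exactly the chars with count 1,
-- the second exactly those with count ≥ 2, both without duplicates
theorem pvB_inv (l : List Char) :
    let st := l.foldl
      (fun (s : PySem.Set Char × PySem.Set Char) x =>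
        if PySem.Set.contains s.1 x then (PySem.Set.discard s.1 x, PySem.Set.add s.2 x)
        else if PySem.Set.contains s.2 x then s
        else (PySem.Set.add s.1 x, s.2))
      (PySem.Set.empty, PySem.Set.empty)
    st.1.Nodup ∧ st.2.Nodup ∧ (∀ y, y ∈ st.1 ↔ l.count y = 1) ∧ (∀ y, y ∈ st.2 ↔ 2 ≤ l.count y) := by
  induction l using List.reverseRecOn with
  | nil => simp [PySem.Set.empty]
  | append_singleton l x ih =>
    simp only [List.foldl_append, List.foldl_cons, List.foldl_nil] at *
    obtain ⟨h1, h2, hm1, hm2⟩ := ih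
    set st := l.foldl
      (fun (s : PySem.Set Char × PySem.Set Char) x =>
        if PySem.Set.contains s.1 x then (PySem.Set.discard s.1 x, PySem.Set.add s.2 x)
        else if PySem.Set.contains s.2 x then s
        else (PySem.Set.add s.1 x, s.2))
      (PySem.Set.empty, PySem.Set.empty) with hst
    have hcnt : ∀ y : Char, (l ++ [x]).count y = l.count y + if x = y then 1 else 0 := by
      intro y
      rw [List.count_append, List.count_singleton]
      simp [beq_iff_eq]
    by_cases c1 : PySem.Set.contains st.1 x = true
    · have hx1 : l.count x = 1 := (hm1 x).mp ((PySem.Set.contains_iff _ _).mp c1)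
      rw [if_pos c1]
      refine ⟨PySem.Set.nodup_discard _ _ h1, PySem.Set.nodup_add _ _ h2, ?_, ?_⟩
      · intro y
        rw [PySem.Set.mem_discard, hm1 y, hcnt y]
        by_cases hyx : y = x
        · subst hyx; simp [hx1]
        · simp [hyx, Ne.symm hyx]
      · intro y
        rw [PySem.Set.mem_add, hm2 y, hcnt y]
        by_cases hyx : y = x
        · subst hyx; simp [hx1]
        · simp [hyx, Ne.symm hyx]
    · have hx1 : l.count x ≠ 1 := fun h => c1 ((PySem.Set.contains_iff _ _).mpr ((hm1 x).mpr h))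
      rw [if_neg c1]
      by_cases c2 : PySem.Set.contains st.2 x = true
      · have hx2 : 2 ≤ l.count x := (hm2 x).mp ((PySem.Set.contains_iff _ _).mp c2)
        rw [if_pos c2]
        refine ⟨h1, h2, ?_, ?_⟩
        · intro y
          rw [hm1 y, hcnt y]
          by_cases hyx : y = x
          · subst hyx; rw [if_pos rfl]; omega
          · simp [Ne.symm hyx]
        · intro y
          rw [hm2 y, hcnt y]
          by_cases hyx : y = x
          · subst hyx; rw [if_pos rfl]; omega
          · simp [Ne.symm hyx]
      · have hx2 : ¬ 2 ≤ l.count x := fun h => c2 ((PySem.Set.contains_iff _ _).mpr ((hm2 x).mpr h))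
        have hx0 : l.count x = 0 := by omega
        rw [if_neg c2]
        refine ⟨PySem.Set.nodup_add _ _ h1, h2, ?_, ?_⟩
        · intro y
          rw [PySem.Set.mem_add, hm1 y, hcnt y]
          by_cases hyx : y = x
          · subst hyx; simp [hx0]
          · simp [hyx, Ne.symm hyx]
        · intro y
          rw [hm2 y, hcnt y]
          by_cases hyx : y = x
          · subst hyx; simp [hx0]
          · simp [Ne.symm hyx]

-- B's first set has the same length as A's list of once-occurring consonants
theorem pvB_eq (fl : List Char) :
    (fl.foldl
      (fun (s : PySem.Set Char × PySem.Set Char) x =>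
        if PySem.Set.contains s.1 x then (PySem.Set.discard s.1 x, PySem.Set.add s.2 x)
        else if PySem.Set.contains s.2 x then s
        else (PySem.Set.add s.1 x, s.2))
      (PySem.Set.empty, PySem.Set.empty)).1.length
      = ((PySem.Set.ofList fl).filter (fun k => fl.count k == 1)).length := by
  obtain ⟨h1, -, hm1, -⟩ := pvB_inv fl
  apply List.Perm.length_eq
  rw [List.perm_ext_iff_of_nodup h1 ((PySem.Set.nodup_ofList fl).filter _)]
  intro a
  rw [hm1 a, List.mem_filter, PySem.Set.mem_ofList]
  constructor
  · intro h
    exact ⟨List.count_pos_iff.mp (by omega), by simp [h]⟩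
  · rintro ⟨-, h⟩
    simpa using h

-- ===== VERDICT (by name: the statement is the Claim_ definition above) =====
theorem consonant_count_spec : Claim_equal_consonant_count := by
  intro input _
  show consonant_count input = consonant_count_alt input
  unfold consonant_count consonant_count_alt
  simp only [PySem.Set.len]
  have hfA : ∀ (l : List Char),
      l.foldl (fun (d : PySem.Dict Char Int) x => if pvCond x then
          (if d.contains x then d.modify x 0 (· + 1) else d.insert x 1) else d) PySem.Dict.empty
        = (l.filter pvCond).foldl (fun d x => d.modify x 0 (· + 1)) PySem.Dict.empty := by
    intro l
    rw [List.foldl_filter]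
    congr 1
    funext d x
    by_cases h : pvCond x = true
    · simp only [h, if_true]; exact pvA_step d x
    · simp [h]
  rw [show (fun (d : PySem.Dict Char Int) x =>
      if PySem.Chars.isalpha x && !(PySem.Set.contains (PySem.Set.ofList ['a','e','o','u','i']) x) then
        (if d.contains x then d.modify x 0 (· + 1) else d.insert x 1) else d)
      = (fun d x => if pvCond x then
        (if d.contains x then d.modify x 0 (· + 1) else d.insert x 1) else d) from rfl]
  rw [hfA, pvA_eq]
  rw [show (fun (s : PySem.Set Char × PySem.Set Char) x =>
      if PySem.Chars.isalpha x && !(PySem.Set.contains (PySem.Set.ofList ['a','e','o','u','i']) x) then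
        (if PySem.Set.contains s.1 x then (PySem.Set.discard s.1 x, PySem.Set.add s.2 x)
         else if PySem.Set.contains s.2 x then s
         else (PySem.Set.add s.1 x, s.2)) else s)
      = (fun s x => if pvCond x then
        (if PySem.Set.contains s.1 x then (PySem.Set.discard s.1 x, PySem.Set.add s.2 x)
         else if PySem.Set.contains s.2 x then s
         else (PySem.Set.add s.1 x, s.2)) else s) from rfl]
  rw [show ((PySem.Str.lower input).toList.foldl
      (fun (s : PySem.Set Char × PySem.Set Char) x => if pvCond x then
        (if PySem.Set.contains s.1 x then (PySem.Set.discard s.1 x, PySem.Set.add s.2 x)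
         else if PySem.Set.contains s.2 x then s
         else (PySem.Set.add s.1 x, s.2)) else s)
      (PySem.Set.empty, PySem.Set.empty))
      = (((PySem.Str.lower input).toList.filter pvCond).foldl
      (fun (s : PySem.Set Char × PySem.Set Char) x =>
        if PySem.Set.contains s.1 x then (PySem.Set.discard s.1 x, PySem.Set.add s.2 x)
        else if PySem.Set.contains s.2 x then s
        else (PySem.Set.add s.1 x, s.2))
      (PySem.Set.empty, PySem.Set.empty)) from (List.foldl_filter).symm]
  rw [pvB_eq]
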